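-- pv_equiv track=rewrite | github.com/ibrahimsaw/GestionFormations | PrGestionFormation/Permissions_Manager/forms.py | translate_permission_name
-- ===== SOURCE A (Python) =====
-- def translate_permission_name(name):
--     translations = {
--         'Can add': 'Ajouter',
--         'Can change': 'Modifier',
--         'Can delete': 'Supprimer',
--         'Can view': 'Voir',
--     }
--     for eng, fr in translations.items():
--         name = name.replace(eng, fr)
--     return name
-- ===== SOURCE B (Python) =====
-- _PHRASES = (
--     ('Can add', 'Ajouter'),
--     ('Can change', 'Modifier'),
--     ('Can delete', 'Supprimer'),
--     ('Can view', 'Voir'),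
-- )
--
-- def translate_permission_name(name):
--     pieces = []
--     i = 0
--     n = len(name)
--     while i < n:
--         for eng, fr in _PHRASES:
--             if name.startswith(eng, i):
--                 pieces.append(fr)
--                 i += len(eng)
--                 break
--         else:
--             pieces.append(name[i])
--             i += 1
--     return ''.join(pieces)
-- ===== Notes on version B (the rewrite author's own statement) =====
-- stated objective: alternative
-- what changed: A makes four sequential full-string .replace passes (each building a new string); B makes one left-to-right scan that tries the four phrases at each position and builds the output once.
import Mathlib
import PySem

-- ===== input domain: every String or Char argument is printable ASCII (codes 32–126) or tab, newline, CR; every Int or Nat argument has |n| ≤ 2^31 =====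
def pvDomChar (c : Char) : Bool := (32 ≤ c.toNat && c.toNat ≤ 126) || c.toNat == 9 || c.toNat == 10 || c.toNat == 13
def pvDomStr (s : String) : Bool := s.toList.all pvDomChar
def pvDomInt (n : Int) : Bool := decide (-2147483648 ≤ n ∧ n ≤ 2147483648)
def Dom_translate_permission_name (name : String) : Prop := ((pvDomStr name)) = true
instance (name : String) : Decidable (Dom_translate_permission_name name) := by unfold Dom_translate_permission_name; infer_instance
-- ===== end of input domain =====

-- B replaces A's four sequential full-string .replace passes by ONE left-to-right scan that tries
-- the four phrases at each position (objective: alternative single-pass algorithm, same results).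

-- ===== PORT A =====
-- A: four chained str.replace calls, in the dict's insertion order.
def translate_permission_name (name : String) : String :=
  PySem.Str.replace
    (PySem.Str.replace
      (PySem.Str.replace
        (PySem.Str.replace name "Can add" "Ajouter")
        "Can change" "Modifier")
      "Can delete" "Supprimer")
    "Can view" "Voir"

-- ===== PORT B =====
-- Hand port (exact) of B's single left-to-right scan: at each position try the four phrases in
-- dict order (startswith), emit the translation and skip the phrase, else copy one character.
def pvScanB : List Char → List Char
  | [] => []
  | c :: t =>
    if ['C','a','n',' ','a','d','d'] <+: (c :: t) then
      ['A','j','o','u','t','e','r'] ++ pvScanB ((c :: t).drop 7)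
    else if ['C','a','n',' ','c','h','a','n','g','e'] <+: (c :: t) then
      ['M','o','d','i','f','i','e','r'] ++ pvScanB ((c :: t).drop 10)
    else if ['C','a','n',' ','d','e','l','e','t','e'] <+: (c :: t) then
      ['S','u','p','p','r','i','m','e','r'] ++ pvScanB ((c :: t).drop 10)
    else if ['C','a','n',' ','v','i','e','w'] <+: (c :: t) then
      ['V','o','i','r'] ++ pvScanB ((c :: t).drop 8)
    else c :: pvScanB t
  termination_by l => l.length
  decreasing_by all_goals simp

def translate_permission_name_alt (name : String) : String :=
  String.ofList (pvScanB name.toList)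

-- ===== PRECONDITION & SPEC =====
def Spec_translate_permission_name (name : String) (out : String) : Prop := out = translate_permission_name_alt name
instance (name : String) (out : String) : Decidable (Spec_translate_permission_name name out) := by unfold Spec_translate_permission_name; infer_instance

-- ===== CLAIM (what is proved, stated in full; the proofs are below) =====
def Claim_equal_translate_permission_name : Prop := ∀ (name : String), Dom_translate_permission_name name → Spec_translate_permission_name name (translate_permission_name name)

-- ===== LEMMAS AND PROOFS =====

-- proof-side constants: the four keys split as 'C' :: tail, and the four values
def pvKT1 : List Char := ['a','n',' ','a','d','d']
def pvKT2 : List Char := ['a','n',' ','c','h','a','n','g','e']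
def pvKT3 : List Char := ['a','n',' ','d','e','l','e','t','e']
def pvKT4 : List Char := ['a','n',' ','v','i','e','w']
def pvV1 : List Char := ['A','j','o','u','t','e','r']
def pvV2 : List Char := ['M','o','d','i','f','i','e','r']
def pvV3 : List Char := ['S','u','p','p','r','i','m','e','r']
def pvV4 : List Char := ['V','o','i','r']

-- single-key scan: the result of one Python str.replace (nonempty key 'C'::kt)
def pvScan1 (kt v : List Char) : List Char → List Char
  | [] => []
  | c :: t =>
    if ('C' :: kt) <+: (c :: t) then v ++ pvScan1 kt v (t.drop kt.length)
    else c :: pvScan1 kt v t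
  termination_by l => l.length
  decreasing_by all_goals simp

lemma pvScan1_nil (kt v : List Char) : pvScan1 kt v [] = [] := by rw [pvScan1]

lemma pvScan1_cons (kt v : List Char) (c : Char) (t : List Char) :
    pvScan1 kt v (c :: t) =
      if ('C' :: kt) <+: (c :: t) then v ++ pvScan1 kt v (t.drop kt.length)
      else c :: pvScan1 kt v t := by
  rw [pvScan1]

lemma pvScanB_nil : pvScanB [] = [] := by rw [pvScanB]

lemma pvScanB_cons (c : Char) (t : List Char) :
    pvScanB (c :: t) =
      if ['C','a','n',' ','a','d','d'] <+: (c :: t) then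
        ['A','j','o','u','t','e','r'] ++ pvScanB ((c :: t).drop 7)
      else if ['C','a','n',' ','c','h','a','n','g','e'] <+: (c :: t) then
        ['M','o','d','i','f','i','e','r'] ++ pvScanB ((c :: t).drop 10)
      else if ['C','a','n',' ','d','e','l','e','t','e'] <+: (c :: t) then
        ['S','u','p','p','r','i','m','e','r'] ++ pvScanB ((c :: t).drop 10)
      else if ['C','a','n',' ','v','i','e','w'] <+: (c :: t) then
        ['V','o','i','r'] ++ pvScanB ((c :: t).drop 8)
      else c :: pvScanB t := by
  rw [pvScanB]

-- Chars.replace.go computed by the single-key scan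
lemma pvGo_eq (kt v : List Char) :
    ∀ (fuel : Nat) (l acc : List Char), l.length ≤ fuel →
      PySem.Chars.replace.go ('C' :: kt) v fuel l acc = acc.reverse ++ pvScan1 kt v l := by
  intro fuel
  induction fuel with
  | zero =>
    intro l acc h
    have hl : l = [] := by cases l <;> simp_all
    subst hl
    rw [PySem.Chars.replace.go, pvScan1_nil, List.append_nil]
  | succ n ih =>
    intro l acc h
    cases l with
    | nil =>
      rw [PySem.Chars.replace.go, pvScan1_nil, List.append_nil]
      omega
    | cons c t =>
      rw [PySem.Chars.replace.go, pvScan1_cons]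
      by_cases hp : ('C' :: kt) <+: (c :: t)
      · have hb : List.isPrefixOf ('C' :: kt) (c :: t) = true := List.isPrefixOf_iff_prefix.mpr hp
        rw [if_pos hb, if_pos hp]
        have hlen : (List.drop ('C' :: kt).length (c :: t)).length ≤ n := by
          simp at h ⊢; omega
        rw [ih _ _ hlen]
        simp [List.drop_succ_cons]
      · have hb : ¬ List.isPrefixOf ('C' :: kt) (c :: t) = true := by
          simpa [List.isPrefixOf_iff_prefix] using hp
        rw [if_neg hb, if_neg hp]
        have hlen : t.length ≤ n := by simp at h; omega
        rw [ih _ _ hlen]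
        simp

-- one Python str.replace with key 'C'::kt IS the single-key scan
lemma pvReplace_eq (kt v s : List Char) :
    PySem.Chars.replace s ('C' :: kt) v = pvScan1 kt v s := by
  rw [PySem.Chars.replace]
  rw [if_neg (by simp)]
  simpa using pvGo_eq kt v s.length s [] (le_refl _)

-- the scan copies any block containing no 'C' (every key starts with 'C')
lemma pvScan1_append (kt v : List Char) (a b : List Char) (ha : ∀ c ∈ a, c ≠ 'C') :
    pvScan1 kt v (a ++ b) = a ++ pvScan1 kt v b := by
  induction a with
  | nil => simp
  | cons c a ih =>
    have hc : ¬ ('C' :: kt) <+: (c :: (a ++ b)) := by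
      intro h
      rcases h with ⟨r, hr⟩
      rw [List.cons_append] at hr
      exact ha c List.mem_cons_self (by injection hr with h1 _; exact h1.symm)
    rw [List.cons_append, pvScan1_cons, if_neg hc,
        ih (fun x hx => ha x (List.mem_cons_of_mem _ hx))]
    rfl

-- a pattern avoiding 'C' and the value's head char that prefixes the scan's output
-- already prefixed the scan's input
lemma pvScan1_prefix_reflect (kt v : List Char) (hv : v ≠ []) :
    ∀ (n : Nat) (x t : List Char), (∀ c ∈ x, c ≠ 'C' ∧ v.head? ≠ some c) →
      t.length ≤ n → x <+: pvScan1 kt v t → x <+: t := by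
  intro n
  induction n with
  | zero =>
    intro x t hx h hpre
    have ht : t = [] := by cases t <;> simp_all
    subst ht
    rw [pvScan1_nil] at hpre
    exact hpre
  | succ n ih =>
    intro x t hx h hpre
    cases t with
    | nil => rw [pvScan1_nil] at hpre; exact hpre
    | cons c t =>
      rw [pvScan1_cons] at hpre
      by_cases hp : ('C' :: kt) <+: (c :: t)
      · rw [if_pos hp] at hpre
        cases x with
        | nil => exact List.nil_prefix
        | cons d x' =>
          cases v with
          | nil => exact absurd rfl hv
          | cons vh vt =>
            rw [List.cons_append, List.cons_prefix_cons] at hpre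
            exact absurd (by simp [hpre.1]) (hx d List.mem_cons_self).2
      · rw [if_neg hp] at hpre
        cases x with
        | nil => exact List.nil_prefix
        | cons d x' =>
          rw [List.cons_prefix_cons] at hpre ⊢
          exact ⟨hpre.1, ih x' t (fun e he => hx e (List.mem_cons_of_mem _ he))
            (by simp at h; omega) hpre.2⟩

-- a character mismatch inside the first block refutes a prefix of the concatenation
lemma pvNotPrefix (p a b : List Char) (i : Nat) (hia : i < a.length) (hip : i < p.length)
    (hne : p[i] ≠ a[i]) : ¬ p <+: (a ++ b) := by
  intro h
  have h2 := h.getElem (i := i) hip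
  rw [List.getElem_append_left hia] at h2
  exact hne h2

-- the four sequential single-key scans compose to B's one multi-key scan
lemma pvComposed : ∀ (n : Nat) (s : List Char), s.length ≤ n →
    pvScan1 pvKT4 pvV4 (pvScan1 pvKT3 pvV3 (pvScan1 pvKT2 pvV2 (pvScan1 pvKT1 pvV1 s))) =
      pvScanB s := by
  intro n
  induction n with
  | zero =>
    intro s h
    have hs : s = [] := by cases s <;> simp_all
    subst hs
    simp [pvScan1_nil, pvScanB_nil]
  | succ n ih =>
    intro s h
    cases s with
    | nil => simp [pvScan1_nil, pvScanB_nil]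
    | cons c t =>
      have hV1 : ∀ x ∈ pvV1, x ≠ 'C' := by simp [pvV1]
      have hV2 : ∀ x ∈ pvV2, x ≠ 'C' := by simp [pvV2]
      have hV3 : ∀ x ∈ pvV3, x ≠ 'C' := by simp [pvV3]
      by_cases h1 : ('C' :: pvKT1) <+: (c :: t)
      · obtain ⟨t', ht'⟩ := h1
        rw [List.cons_append] at ht'
        obtain ⟨hc, ht⟩ := List.cons.inj ht'
        subst hc; subst ht
        have e1 : pvScan1 pvKT1 pvV1 ('C' :: (pvKT1 ++ t')) =
            pvV1 ++ pvScan1 pvKT1 pvV1 t' := by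
          rw [pvScan1_cons, if_pos ⟨t', by simp⟩, List.drop_left]
        have p1 : ['C','a','n',' ','a','d','d'] <+: ('C' :: (pvKT1 ++ t')) :=
          ⟨t', by simp [pvKT1]⟩
        rw [e1, pvScan1_append _ _ _ _ hV1, pvScan1_append _ _ _ _ hV1,
            pvScan1_append _ _ _ _ hV1,
            ih t' (by simp [pvKT1] at h; omega),
            pvScanB_cons, if_pos p1]
        simp [pvKT1, pvV1]
      · by_cases h2 : ('C' :: pvKT2) <+: (c :: t)
        · obtain ⟨t', ht'⟩ := h2
          rw [List.cons_append] at ht'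
          obtain ⟨hc, ht⟩ := List.cons.inj ht'
          subst hc; subst ht
          have e1 : pvScan1 pvKT1 pvV1 ('C' :: (pvKT2 ++ t')) =
              'C' :: (pvKT2 ++ pvScan1 pvKT1 pvV1 t') := by
            rw [pvScan1_cons, if_neg h1, pvScan1_append _ _ _ _ (by simp [pvKT2])]
          have e2 : pvScan1 pvKT2 pvV2 ('C' :: (pvKT2 ++ pvScan1 pvKT1 pvV1 t')) =
              pvV2 ++ pvScan1 pvKT2 pvV2 (pvScan1 pvKT1 pvV1 t') := by
            rw [pvScan1_cons, if_pos ⟨pvScan1 pvKT1 pvV1 t', by simp⟩, List.drop_left]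
          have q1 : ¬ (['C','a','n',' ','a','d','d'] <+: ('C' :: (pvKT2 ++ t'))) := h1
          have p2 : ['C','a','n',' ','c','h','a','n','g','e'] <+: ('C' :: (pvKT2 ++ t')) :=
            ⟨t', by simp [pvKT2]⟩
          rw [e1, e2, pvScan1_append _ _ _ _ hV2, pvScan1_append _ _ _ _ hV2,
              ih t' (by simp [pvKT2] at h; omega),
              pvScanB_cons, if_neg q1, if_pos p2]
          simp [pvKT2, pvV2]
        · by_cases h3 : ('C' :: pvKT3) <+: (c :: t)
          · obtain ⟨t', ht'⟩ := h3
            rw [List.cons_append] at ht'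
            obtain ⟨hc, ht⟩ := List.cons.inj ht'
            subst hc; subst ht
            have e1 : pvScan1 pvKT1 pvV1 ('C' :: (pvKT3 ++ t')) =
                'C' :: (pvKT3 ++ pvScan1 pvKT1 pvV1 t') := by
              rw [pvScan1_cons, if_neg h1, pvScan1_append _ _ _ _ (by simp [pvKT3])]
            have n2 : ¬ ('C' :: pvKT2) <+: ('C' :: (pvKT3 ++ pvScan1 pvKT1 pvV1 t')) := by
              have := pvNotPrefix ('C' :: pvKT2) ('C' :: pvKT3)
                (pvScan1 pvKT1 pvV1 t') 4 (by simp [pvKT3]) (by simp [pvKT2]) (by simp [pvKT2, pvKT3])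
              rw [List.cons_append] at this
              exact this
            have e2 : pvScan1 pvKT2 pvV2 ('C' :: (pvKT3 ++ pvScan1 pvKT1 pvV1 t')) =
                'C' :: (pvKT3 ++ pvScan1 pvKT2 pvV2 (pvScan1 pvKT1 pvV1 t')) := by
              rw [pvScan1_cons, if_neg n2, pvScan1_append _ _ _ _ (by simp [pvKT3])]
            have e3 : pvScan1 pvKT3 pvV3
                ('C' :: (pvKT3 ++ pvScan1 pvKT2 pvV2 (pvScan1 pvKT1 pvV1 t'))) =
                pvV3 ++ pvScan1 pvKT3 pvV3 (pvScan1 pvKT2 pvV2 (pvScan1 pvKT1 pvV1 t')) := by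
              rw [pvScan1_cons,
                  if_pos ⟨pvScan1 pvKT2 pvV2 (pvScan1 pvKT1 pvV1 t'), by simp⟩,
                  List.drop_left]
            have q1 : ¬ (['C','a','n',' ','a','d','d'] <+: ('C' :: (pvKT3 ++ t'))) := h1
            have q2 : ¬ (['C','a','n',' ','c','h','a','n','g','e'] <+: ('C' :: (pvKT3 ++ t'))) := h2
            have p3 : ['C','a','n',' ','d','e','l','e','t','e'] <+: ('C' :: (pvKT3 ++ t')) :=
              ⟨t', by simp [pvKT3]⟩
            rw [e1, e2, e3, pvScan1_append _ _ _ _ hV3,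
                ih t' (by simp [pvKT3] at h; omega),
                pvScanB_cons, if_neg q1, if_neg q2, if_pos p3]
            simp [pvKT3, pvV3]
          · by_cases h4 : ('C' :: pvKT4) <+: (c :: t)
            · obtain ⟨t', ht'⟩ := h4
              rw [List.cons_append] at ht'
              obtain ⟨hc, ht⟩ := List.cons.inj ht'
              subst hc; subst ht
              have e1 : pvScan1 pvKT1 pvV1 ('C' :: (pvKT4 ++ t')) =
                  'C' :: (pvKT4 ++ pvScan1 pvKT1 pvV1 t') := by
                rw [pvScan1_cons, if_neg h1, pvScan1_append _ _ _ _ (by simp [pvKT4])]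
              have n2 : ¬ ('C' :: pvKT2) <+: ('C' :: (pvKT4 ++ pvScan1 pvKT1 pvV1 t')) := by
                have := pvNotPrefix ('C' :: pvKT2) ('C' :: pvKT4)
                  (pvScan1 pvKT1 pvV1 t') 4 (by simp [pvKT4]) (by simp [pvKT2]) (by simp [pvKT2, pvKT4])
                rw [List.cons_append] at this
                exact this
              have e2 : pvScan1 pvKT2 pvV2 ('C' :: (pvKT4 ++ pvScan1 pvKT1 pvV1 t')) =
                  'C' :: (pvKT4 ++ pvScan1 pvKT2 pvV2 (pvScan1 pvKT1 pvV1 t')) := by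
                rw [pvScan1_cons, if_neg n2, pvScan1_append _ _ _ _ (by simp [pvKT4])]
              have n3 : ¬ ('C' :: pvKT3) <+:
                  ('C' :: (pvKT4 ++ pvScan1 pvKT2 pvV2 (pvScan1 pvKT1 pvV1 t'))) := by
                have := pvNotPrefix ('C' :: pvKT3) ('C' :: pvKT4)
                  (pvScan1 pvKT2 pvV2 (pvScan1 pvKT1 pvV1 t')) 4 (by simp [pvKT4]) (by simp [pvKT3]) (by simp [pvKT3, pvKT4])
                rw [List.cons_append] at this
                exact this
              have e3 : pvScan1 pvKT3 pvV3
                  ('C' :: (pvKT4 ++ pvScan1 pvKT2 pvV2 (pvScan1 pvKT1 pvV1 t'))) =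
                  'C' :: (pvKT4 ++ pvScan1 pvKT3 pvV3 (pvScan1 pvKT2 pvV2 (pvScan1 pvKT1 pvV1 t'))) := by
                rw [pvScan1_cons, if_neg n3, pvScan1_append _ _ _ _ (by simp [pvKT4])]
              have e4 : pvScan1 pvKT4 pvV4
                  ('C' :: (pvKT4 ++ pvScan1 pvKT3 pvV3 (pvScan1 pvKT2 pvV2 (pvScan1 pvKT1 pvV1 t')))) =
                  pvV4 ++ pvScan1 pvKT4 pvV4 (pvScan1 pvKT3 pvV3 (pvScan1 pvKT2 pvV2 (pvScan1 pvKT1 pvV1 t'))) := by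
                rw [pvScan1_cons,
                    if_pos ⟨pvScan1 pvKT3 pvV3 (pvScan1 pvKT2 pvV2 (pvScan1 pvKT1 pvV1 t')), by simp⟩,
                    List.drop_left]
              have q1 : ¬ (['C','a','n',' ','a','d','d'] <+: ('C' :: (pvKT4 ++ t'))) := h1
              have q2 : ¬ (['C','a','n',' ','c','h','a','n','g','e'] <+: ('C' :: (pvKT4 ++ t'))) := h2
              have q3 : ¬ (['C','a','n',' ','d','e','l','e','t','e'] <+: ('C' :: (pvKT4 ++ t'))) := h3
              have p4 : ['C','a','n',' ','v','i','e','w'] <+: ('C' :: (pvKT4 ++ t')) :=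
                ⟨t', by simp [pvKT4]⟩
              rw [e1, e2, e3, e4,
                  ih t' (by simp [pvKT4] at h; omega),
                  pvScanB_cons, if_neg q1, if_neg q2, if_neg q3, if_pos p4]
              simp [pvKT4, pvV4]
            · -- no key matches at the head: both scans copy c
              have e1 : pvScan1 pvKT1 pvV1 (c :: t) = c :: pvScan1 pvKT1 pvV1 t := by
                rw [pvScan1_cons, if_neg h1]
              have n2 : ¬ ('C' :: pvKT2) <+: (c :: pvScan1 pvKT1 pvV1 t) := by
                intro hpre
                rw [List.cons_prefix_cons] at hpre
                obtain ⟨hc, hx⟩ := hpre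
                have : pvKT2 <+: t :=
                  pvScan1_prefix_reflect pvKT1 pvV1 (by simp [pvV1]) _ pvKT2 t (by simp [pvKT2, pvV1]) le_rfl hx
                exact h2 (List.cons_prefix_cons.mpr ⟨hc, this⟩)
              have e2 : pvScan1 pvKT2 pvV2 (c :: pvScan1 pvKT1 pvV1 t) =
                  c :: pvScan1 pvKT2 pvV2 (pvScan1 pvKT1 pvV1 t) := by
                rw [pvScan1_cons, if_neg n2]
              have n3 : ¬ ('C' :: pvKT3) <+:
                  (c :: pvScan1 pvKT2 pvV2 (pvScan1 pvKT1 pvV1 t)) := by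
                intro hpre
                rw [List.cons_prefix_cons] at hpre
                obtain ⟨hc, hx⟩ := hpre
                have r2 : pvKT3 <+: pvScan1 pvKT1 pvV1 t :=
                  pvScan1_prefix_reflect pvKT2 pvV2 (by simp [pvV2]) _ pvKT3 _ (by simp [pvKT3, pvV2]) le_rfl hx
                have r1 : pvKT3 <+: t :=
                  pvScan1_prefix_reflect pvKT1 pvV1 (by simp [pvV1]) _ pvKT3 t (by simp [pvKT3, pvV1]) le_rfl r2
                exact h3 (List.cons_prefix_cons.mpr ⟨hc, r1⟩)
              have e3 : pvScan1 pvKT3 pvV3 (c :: pvScan1 pvKT2 pvV2 (pvScan1 pvKT1 pvV1 t)) =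
                  c :: pvScan1 pvKT3 pvV3 (pvScan1 pvKT2 pvV2 (pvScan1 pvKT1 pvV1 t)) := by
                rw [pvScan1_cons, if_neg n3]
              have n4 : ¬ ('C' :: pvKT4) <+:
                  (c :: pvScan1 pvKT3 pvV3 (pvScan1 pvKT2 pvV2 (pvScan1 pvKT1 pvV1 t))) := by
                intro hpre
                rw [List.cons_prefix_cons] at hpre
                obtain ⟨hc, hx⟩ := hpre
                have r3 : pvKT4 <+: pvScan1 pvKT2 pvV2 (pvScan1 pvKT1 pvV1 t) :=
                  pvScan1_prefix_reflect pvKT3 pvV3 (by simp [pvV3]) _ pvKT4 _ (by simp [pvKT4, pvV3]) le_rfl hx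
                have r2 : pvKT4 <+: pvScan1 pvKT1 pvV1 t :=
                  pvScan1_prefix_reflect pvKT2 pvV2 (by simp [pvV2]) _ pvKT4 _ (by simp [pvKT4, pvV2]) le_rfl r3
                have r1 : pvKT4 <+: t :=
                  pvScan1_prefix_reflect pvKT1 pvV1 (by simp [pvV1]) _ pvKT4 t (by simp [pvKT4, pvV1]) le_rfl r2
                exact h4 (List.cons_prefix_cons.mpr ⟨hc, r1⟩)
              have e4 : pvScan1 pvKT4 pvV4 (c :: pvScan1 pvKT3 pvV3 (pvScan1 pvKT2 pvV2 (pvScan1 pvKT1 pvV1 t))) =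
                  c :: pvScan1 pvKT4 pvV4 (pvScan1 pvKT3 pvV3 (pvScan1 pvKT2 pvV2 (pvScan1 pvKT1 pvV1 t))) := by
                rw [pvScan1_cons, if_neg n4]
              have q1 : ¬ (['C','a','n',' ','a','d','d'] <+: (c :: t)) := h1
              have q2 : ¬ (['C','a','n',' ','c','h','a','n','g','e'] <+: (c :: t)) := h2
              have q3 : ¬ (['C','a','n',' ','d','e','l','e','t','e'] <+: (c :: t)) := h3
              have q4 : ¬ (['C','a','n',' ','v','i','e','w'] <+: (c :: t)) := h4
              rw [e1, e2, e3, e4, ih t (by simp at h; omega),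
                  pvScanB_cons, if_neg q1, if_neg q2, if_neg q3, if_neg q4]

-- A's four chained replaces, moved to the character-list side
lemma pvA_toChars (name : String) :
    translate_permission_name name =
      String.ofList (pvScan1 pvKT4 pvV4 (pvScan1 pvKT3 pvV3
        (pvScan1 pvKT2 pvV2 (pvScan1 pvKT1 pvV1 name.toList)))) := by
  unfold translate_permission_name
  have hs : ∀ (s o n : String), PySem.Str.replace s o n =
      String.ofList (PySem.Chars.replace s.toList o.toList n.toList) := fun _ _ _ => rfl
  rw [hs, hs, hs, hs, String.toList_ofList, String.toList_ofList, String.toList_ofList]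
  have k1 : ("Can add" : String).toList = 'C' :: pvKT1 := by decide
  have k2 : ("Can change" : String).toList = 'C' :: pvKT2 := by decide
  have k3 : ("Can delete" : String).toList = 'C' :: pvKT3 := by decide
  have k4 : ("Can view" : String).toList = 'C' :: pvKT4 := by decide
  have v1 : ("Ajouter" : String).toList = pvV1 := by decide
  have v2 : ("Modifier" : String).toList = pvV2 := by decide
  have v3 : ("Supprimer" : String).toList = pvV3 := by decide
  have v4 : ("Voir" : String).toList = pvV4 := by decide
  rw [k1, v1, k2, v2, k3, v3, k4, v4,
      pvReplace_eq, pvReplace_eq, pvReplace_eq, pvReplace_eq]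

-- ===== VERDICT (by name: the statement is the Claim_ definition above) =====
theorem translate_permission_name_spec : Claim_equal_translate_permission_name := by
  intro name _
  unfold Spec_translate_permission_name translate_permission_name_alt
  rw [pvA_toChars, pvComposed name.toList.length name.toList le_rfl]
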